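-- pv_equiv track=rewrite | github.com/comeonboi/algorithm-practise | Ceither/LC2178.py | maximumEvenSplit
-- ===== SOURCE A (Python) =====
-- from typing import List
--
-- def maximumEvenSplit(finalSum: int) -> List[int]:
--     if finalSum % 2:
--         return []
--     res = []
--     total = 0
--     #Greedy
--     for i in range(2, finalSum + 1, 2):
--         res.append(i)
--         total += i
--         if total >= finalSum:
--             break
--     if total == finalSum:
--         return res
--     else:
--         temp = total - finalSum
--         res.pop(res.index(temp))
--     return res
-- ===== SOURCE B (Python) =====
-- from typing import List
--
-- def maximumEvenSplit(finalSum: int) -> List[int]: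
--     if finalSum % 2:
--         return []
--     if finalSum <= 0:
--         return []
--     # k = smallest k >= 1 with k*(k+1) >= finalSum, found by binary search
--     lo, hi = 1, finalSum
--     while lo < hi:
--         mid = (lo + hi) // 2
--         if mid * (mid + 1) >= finalSum:
--             hi = mid
--         else:
--             lo = mid + 1
--     k = lo
--     res = list(range(2, 2 * k + 1, 2))
--     total = k * (k + 1)
--     if total == finalSum:
--         return res
--     res.remove(total - finalSum)
--     return res
-- ===== Notes on version B (the rewrite author's own statement) =====
-- stated objective: alternative
-- what changed: Replaces A's incremental greedy loop (append/accumulate until the running sum reaches finalSum, then index+pop the overshoot) by a direct computation: binary-search the smallest k with k*(k+1) >= finalSum, build the whole even list range(2, 2k+1, 2) at once, and remove the single overshoot element. Pre_ excludes negative even inputs, on which A raises ValueError (B returns []).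
import Mathlib
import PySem

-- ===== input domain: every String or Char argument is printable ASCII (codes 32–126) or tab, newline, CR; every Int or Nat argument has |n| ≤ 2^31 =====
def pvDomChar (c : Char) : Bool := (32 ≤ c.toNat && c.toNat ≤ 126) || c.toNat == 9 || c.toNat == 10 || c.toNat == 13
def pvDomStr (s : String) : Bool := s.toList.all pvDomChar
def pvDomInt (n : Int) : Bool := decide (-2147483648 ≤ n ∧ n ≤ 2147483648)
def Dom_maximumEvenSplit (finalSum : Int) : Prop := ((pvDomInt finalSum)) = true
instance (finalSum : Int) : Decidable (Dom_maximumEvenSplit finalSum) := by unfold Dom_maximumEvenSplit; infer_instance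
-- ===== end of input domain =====

-- B replaces A's accumulate-until-reached greedy loop by a binary search for the cut-off k,
-- then builds the even list in one stroke and removes the single overshoot element.

-- ===== PORT A =====
-- the 'for i in range(2, finalSum+1, 2): append; total += i; if total >= finalSum: break' loop
def pvLoopA (s : Int) : List Int → List Int → Int → List Int × Int
  | [], res, total => (res, total)
  | i :: rest, res, total =>
      let res' := res ++ [i]
      let total' := total + i
      if s ≤ total' then (res', total') else pvLoopA s rest res' total'

def maximumEvenSplit (finalSum : Int) : List Int :=
  if PySem.Int.mod finalSum 2 ≠ 0 then []
  else
    let st := pvLoopA finalSum (PySem.List.pyRange 2 (finalSum + 1) 2) [] 0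
    let res := st.1
    let total := st.2
    if total = finalSum then res
    else
      let temp := total - finalSum
      -- res.pop(res.index(temp)); Python raises ValueError when temp ∉ res (excluded by Pre_)
      match PySem.List.index? res temp with
      | some j =>
          match PySem.List.pop? res (j : Int) with
          | some (_, l) => l
          | none => []
      | none => []

-- ===== PORT B =====
-- 'while lo < hi: mid = (lo+hi)//2; if mid*(mid+1) >= s: hi = mid else lo = mid+1'
def pvBSearch (s lo hi : Int) : Int :=
  if h : lo < hi then
    let mid := PySem.Int.floordiv (lo + hi) 2
    if s ≤ mid * (mid + 1) then pvBSearch s lo mid else pvBSearch s (mid + 1) hi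
  else lo
termination_by (hi - lo).toNat
decreasing_by
  · have hlt : PySem.Int.floordiv (lo + hi) 2 < hi := by
      rw [PySem.Int.floordiv_lt_iff_lt_mul (by omega)]; omega
    omega
  · have hb := PySem.Int.floordiv_two_mid_bounds (le_of_lt h)
    omega

def maximumEvenSplit_alt (finalSum : Int) : List Int :=
  if PySem.Int.mod finalSum 2 ≠ 0 then []
  else if finalSum ≤ 0 then []
  else
    let k := pvBSearch finalSum 1 finalSum
    let res := PySem.List.pyRange 2 (2 * k + 1) 2
    let total := k * (k + 1)
    if total = finalSum then res
    else
      -- res.remove(total - finalSum); ValueError (none) is unreachable for even finalSum ≥ 2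
      match PySem.List.remove? res (total - finalSum) with
      | some l => l
      | none => []

-- ===== PRECONDITION & SPEC =====
-- Pre_ excludes exactly the negative even inputs, on which A raises ValueError
-- (res.index(temp) on the empty list); A returns normally everywhere else.
def Pre_maximumEvenSplit (finalSum : Int) : Prop := finalSum % 2 ≠ 0 ∨ 0 ≤ finalSum
instance (finalSum : Int) : Decidable (Pre_maximumEvenSplit finalSum) := by unfold Pre_maximumEvenSplit; infer_instance
def pvWitness_maximumEvenSplit : Int := 10

def Spec_maximumEvenSplit (finalSum : Int) (out : List Int) : Prop := out = maximumEvenSplit_alt finalSum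
instance (finalSum : Int) (out : List Int) : Decidable (Spec_maximumEvenSplit finalSum out) := by unfold Spec_maximumEvenSplit; infer_instance

-- ===== CLAIM (what is proved, stated in full; the proofs are below) =====
def Claim_equal_maximumEvenSplit : Prop := ∀ (finalSum : Int), Dom_maximumEvenSplit finalSum → Pre_maximumEvenSplit finalSum → Spec_maximumEvenSplit finalSum (maximumEvenSplit finalSum)
-- ===== LEMMAS AND PROOFS =====

-- the list [2, 4, …, 2*k]
def pvEvens (k : Nat) : List Int := (List.range k).map (fun j : Nat => 2 + 2 * (j : Int))

-- the cut-off: smallest k with s ≤ k*(k+1)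
theorem pvK_ex (s : Int) : ∃ k : Nat, s ≤ (k : Int) * ((k : Int) + 1) := by
  refine ⟨s.toNat, ?_⟩
  have h1 : (s.toNat : Int) = max s 0 := by omega
  nlinarith [le_max_left s 0, le_max_right s 0, sq_nonneg (max s 0)]

def pvK (s : Int) : Nat := Nat.find (pvK_ex s)

theorem pvK_le {s : Int} : s ≤ (pvK s : Int) * ((pvK s : Int) + 1) := Nat.find_spec (pvK_ex s)

theorem pvK_le_of (s : Int) (k : Nat) (h : s ≤ (k : Int) * ((k : Int) + 1)) : pvK s ≤ k :=
  Nat.find_le h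

theorem pvEvens_succ (k : Nat) : pvEvens (k + 1) = pvEvens k ++ [2 + 2 * (k : Int)] := by
  simp [pvEvens, List.range_succ]

theorem pvEvens_eq_pyRange (k : Nat) :
    PySem.List.pyRange 2 (2 * (k : Int) + 1) 2 = pvEvens k := by
  rw [PySem.List.pyRange_of_pos _ _ (by omega)]
  rcases Nat.eq_zero_or_pos k with hk | hk
  · subst hk; simp [pvEvens]
  · have h2 : (2 : Int) < 2 * (k : Int) + 1 := by omega
    have hc : ((2 * (k : Int) + 1 - 2 + 2 - 1) / 2).toNat = k := by omega
    rw [if_pos h2, hc]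
    unfold pvEvens
    rfl

-- A's loop invariant
theorem pvLoopA_inv (s : Int) (n j : Nat)
    (hj : (j : Int) * ((j : Int) + 1) < s)
    (hn : j + n = (s / 2).toNat) (hs : 2 ∣ s) (hs2 : 2 ≤ s) :
    pvLoopA s ((List.range n).map (fun k : Nat => 2 + 2 * ((j : Int) + (k : Int))))
      (pvEvens j) ((j : Int) * ((j : Int) + 1))
      = (pvEvens (pvK s), (pvK s : Int) * ((pvK s : Int) + 1)) := by
  induction n generalizing j with
  | zero =>
      exfalso
      rcases hs with ⟨t, ht⟩
      have hj' : (j : Int) = t := by omega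
      rw [hj'] at hj
      nlinarith
  | succ m ih =>
      rw [List.range_succ_eq_map]
      simp only [List.map_cons, List.map_map, pvLoopA]
      have htot : (j : Int) * ((j : Int) + 1) + (2 + 2 * ((j : Int) + (0 : Nat))) =
          ((j + 1 : Nat) : Int) * (((j + 1 : Nat) : Int) + 1) := by push_cast; ring
      have hres : pvEvens j ++ [2 + 2 * ((j : Int) + ((0 : Nat) : Int))] = pvEvens (j + 1) := by
        rw [pvEvens_succ]; push_cast; ring_nf
      by_cases hc : s ≤ (j : Int) * ((j : Int) + 1) + (2 + 2 * ((j : Int) + ((0 : Nat) : Int)))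
      · rw [if_pos hc]
        have hK : pvK s = j + 1 := by
          have h1 : pvK s ≤ j + 1 := pvK_le_of s (j + 1) (by push_cast at hc ⊢; linarith)
          have h2 : j < pvK s := by
            by_contra hle
            exact absurd (pvK_le (s := s)) (by
              have : pvK s ≤ j := by omega
              have hmono : (pvK s : Int) * ((pvK s : Int) + 1) ≤ (j : Int) * ((j : Int) + 1) := by
                have : (pvK s : Int) ≤ j := by exact_mod_cast this
                nlinarith [Int.natCast_nonneg (pvK s)]
              omega)
          omega
        rw [hK, htot, hres]
      · rw [if_neg hc]
        have hlt : ((j + 1 : Nat) : Int) * (((j + 1 : Nat) : Int) + 1) < s := by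
          push_cast at hc ⊢; linarith
        have := ih (j + 1) hlt (by omega)
        rw [htot, hres]
        convert this using 2
        apply List.map_congr_left
        intro x _
        simp only [Function.comp_apply]
        push_cast; ring

theorem pvBSearch_eq (s : Int) : ∀ lo hi : Int, 0 ≤ lo → lo ≤ (pvK s : Int) →
    (pvK s : Int) ≤ hi → pvBSearch s lo hi = (pvK s : Int) := by
  intro lo hi
  induction lo, hi using pvBSearch.induct s with
  | case1 lo hi h mid hc ih =>
      intro h0 hlo hhi
      rw [pvBSearch, dif_pos h, if_pos hc]
      have hb := PySem.Int.floordiv_two_mid_bounds (le_of_lt h)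
      have hmid0 : 0 ≤ mid := le_trans h0 hb.1
      have hKle : (pvK s : Int) ≤ mid := by
        have := pvK_le_of s mid.toNat (by
          have : (mid.toNat : Int) = mid := by omega
          rw [this]; exact hc)
        omega
      exact ih h0 hlo hKle
  | case2 lo hi h mid hc ih =>
      intro h0 hlo hhi
      rw [pvBSearch, dif_pos h, if_neg hc]
      have hb := PySem.Int.floordiv_two_mid_bounds (le_of_lt h)
      have hmid0 : 0 ≤ mid := le_trans h0 hb.1
      have hlt : mid < (pvK s : Int) := by
        by_contra hge
        rw [not_lt] at hge
        have hmono : (pvK s : Int) * ((pvK s : Int) + 1) ≤ mid * (mid + 1) := by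
          nlinarith [Int.natCast_nonneg (pvK s)]
        exact hc (le_trans pvK_le hmono)
      exact ih (by omega) (by omega) hhi
  | case3 lo hi h =>
      intro h0 hlo hhi
      rw [pvBSearch, dif_neg h]
      omega

-- index-then-pop = remove-first-occurrence
theorem pvPop_index_eq_remove (xs : List Int) (v : Int) :
    (match PySem.List.index? xs v with
     | some j =>
         match PySem.List.pop? xs (j : Int) with
         | some (_, l) => l
         | none => ([] : List Int)
     | none => []) =
    (match PySem.List.remove? xs v with
     | some l => l
     | none => []) := by
  induction xs with
  | nil => simp [PySem.List.index?, PySem.List.remove?]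
  | cons x xs ih =>
      by_cases hx : x = v
      · subst hx
        rw [PySem.List.index?_cons_self, PySem.List.remove?_cons_self]
        simp [PySem.List.pop?_zero_cons]
      · rw [PySem.List.index?_cons_of_ne xs hx, PySem.List.remove?_cons_of_ne xs hx]
        cases hidx : PySem.List.index? xs v with
        | none =>
            have hnm : v ∉ xs := (PySem.List.index?_eq_none_iff xs v).mp hidx
            have hrm : PySem.List.remove? xs v = none := (PySem.List.remove?_eq_none_iff xs v).mpr hnm
            rw [hrm]
            simp
        | some j =>
            have hmem : v ∈ xs := (PySem.List.index?_isSome_iff xs v).mp (by rw [hidx]; rfl)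
            cases hrem : PySem.List.remove? xs v with
            | none => exact absurd ((PySem.List.remove?_eq_none_iff xs v).mp hrem) (by simp [hmem])
            | some l =>
                rw [hidx, hrem] at ih
                rcases PySem.List.getElem_of_index?_eq_some hidx with ⟨hj, -, -⟩
                have hpop' := PySem.List.pop?_natCast xs j hj
                simp only [hpop'] at ih
                have hpop := PySem.List.pop?_natCast (x :: xs) (j + 1) (by simpa using hj)
                push_cast at hpop
                simp only [Option.map_some]
                simp [hpop, List.eraseIdx_cons_succ, ih]

theorem pvMain (s : Int) (h2 : 2 ≤ s) (hdvd : 2 ∣ s) :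
    maximumEvenSplit s = maximumEvenSplit_alt s := by
  have hmod : PySem.Int.mod s 2 = 0 := by
    rw [PySem.Int.mod_eq_zero_iff_dvd]; exact hdvd
  have hK1 : 1 ≤ pvK s := by
    by_contra h
    have h0 : pvK s = 0 := by omega
    have hle := pvK_le (s := s)
    rw [h0] at hle
    push_cast at hle
    omega
  have hKs : (pvK s : Int) ≤ s := by
    have := pvK_le_of s s.toNat (by
      have hs : (s.toNat : Int) = s := by omega
      rw [hs]; nlinarith)
    omega
  -- A's loop reaches (pvEvens K, K*(K+1))
  have hloop : pvLoopA s (PySem.List.pyRange 2 (s + 1) 2) [] 0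
      = (pvEvens (pvK s), (pvK s : Int) * ((pvK s : Int) + 1)) := by
    have hrange : PySem.List.pyRange 2 (s + 1) 2
        = (List.range (s / 2).toNat).map (fun k : Nat => 2 + 2 * (((0 : Nat) : Int) + (k : Int))) := by
      rw [PySem.List.pyRange_of_pos _ _ (by omega)]
      have hlt : (2 : Int) < s + 1 := by omega
      have hc : ((s + 1 - 2 + 2 - 1) / 2).toNat = (s / 2).toNat := by
        congr 1
        omega
      rw [if_pos hlt, hc]
      apply List.map_congr_left
      intro j _
      push_cast; ring
    have := pvLoopA_inv s (s / 2).toNat 0 (by norm_num; omega) (by omega) hdvd h2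
    rw [hrange]
    simpa [pvEvens] using this
  unfold maximumEvenSplit maximumEvenSplit_alt
  rw [hmod]
  simp only [ne_eq, not_true_eq_false, not_false_eq_true, if_neg]
  rw [if_neg (by omega : ¬ s ≤ 0)]
  rw [pvBSearch_eq s 1 s (by omega) (by exact_mod_cast hK1) hKs]
  rw [pvEvens_eq_pyRange (pvK s), hloop]
  simp only
  by_cases heq : (pvK s : Int) * ((pvK s : Int) + 1) = s
  · rw [if_pos heq, if_pos heq]
  · rw [if_neg heq, if_neg heq]
    exact pvPop_index_eq_remove _ _

-- ===== VERDICT (by name: the statement is the Claim_ definition above) =====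
theorem maximumEvenSplit_spec : Claim_equal_maximumEvenSplit := by
  intro s _ hpre
  unfold Spec_maximumEvenSplit
  by_cases hodd : s % 2 = 0
  · have hdvd : 2 ∣ s := Int.dvd_of_emod_eq_zero hodd
    have hs0 : 0 ≤ s := by
      rcases hpre with h | h
      · exact absurd hodd h
      · exact h
    by_cases hz : s = 0
    · subst hz; decide
    · exact pvMain s (by omega) hdvd
  · have hmod : PySem.Int.mod s 2 ≠ 0 := by
      rw [PySem.Int.mod_eq_emod_of_pos (by omega : (0:Int) < 2)]
      exact hodd
    unfold maximumEvenSplit maximumEvenSplit_alt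
    rw [if_pos hmod, if_pos hmod]
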